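-- pv_equiv track=rewrite | github.com/0xJchen/HanabiZero | core/deprecated.py | split_context
-- ===== SOURCE A (Python) =====
-- def split_context(batch_context, split_num):#game_lst, game_pos_lst, indices_lst, weights_lst, make_time_lst = batch_context
--     batch_context_lst = []
--
--     context_num = len(batch_context)
--     batch_size = len(batch_context[0])
--     split_size = batch_size // split_num
--
--     assert split_size * split_num == batch_size
--
--     for i in range(split_num):
--         beg_index = split_size * i
--         end_index = split_size * (i + 1)
--
--         _context = []
--         for j in range(context_num):
--             _context.append(batch_context[j][beg_index:end_index])
--
--         batch_context_lst.append(_context)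
--
--     return batch_context_lst
-- ===== SOURCE B (Python) =====
-- def split_context(batch_context, split_num):
--     batch_size = len(batch_context[0])
--     split_size = batch_size // split_num
--     assert split_size * split_num == batch_size
--     per_array = [[arr[split_size * i: split_size * (i + 1)] for i in range(split_num)]
--                  for arr in batch_context]
--     return [list(group) for group in zip(*per_array)]
-- ===== Notes on version B (the rewrite author's own statement) =====
-- stated objective: alternative
-- what changed: B inverts the loop nesting: it first builds, per context array, that array's list of split_num chunks, then transposes with zip(*...) so each output slice is a grouped tuple, instead of A's slice-major gather with an inner index loop over arrays.
import Mathlib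
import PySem

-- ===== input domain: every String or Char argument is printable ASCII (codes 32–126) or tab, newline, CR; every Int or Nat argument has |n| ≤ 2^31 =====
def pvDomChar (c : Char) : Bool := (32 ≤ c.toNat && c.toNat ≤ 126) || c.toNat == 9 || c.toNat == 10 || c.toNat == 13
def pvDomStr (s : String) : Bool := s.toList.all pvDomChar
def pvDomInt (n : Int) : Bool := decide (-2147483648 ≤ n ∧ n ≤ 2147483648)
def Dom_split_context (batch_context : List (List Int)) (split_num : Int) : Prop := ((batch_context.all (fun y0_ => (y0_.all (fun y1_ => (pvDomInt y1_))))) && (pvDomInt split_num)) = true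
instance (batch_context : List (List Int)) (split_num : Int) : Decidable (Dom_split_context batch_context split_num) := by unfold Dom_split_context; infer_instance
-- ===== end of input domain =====

-- B inverts the loop nesting (per-array chunking followed by a zip(*...) transpose) instead of A's
-- slice-major gather with an inner index loop; same cost, alternative decomposition.

-- ===== PORT A =====
def split_context (batch_context : List (List Int)) (split_num : Int) : List (List (List Int)) :=
  let context_num : Int := batch_context.length
  let batch_size : Int := ((PySem.List.pyGet? batch_context 0).getD []).length
  let split_size : Int := PySem.Int.floordiv batch_size split_num
  -- assert split_size * split_num == batch_size : raises outside Pre_split_context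
  (PySem.List.pyRange 0 split_num 1).map (fun i =>
    (PySem.List.pyRange 0 context_num 1).map (fun j =>
      PySem.List.slice (PySem.List.pyGetD batch_context j [])
        (some (split_size * i)) (some (split_size * (i + 1)))))

-- ===== PORT B =====
-- zip(*lists) for lists of lists of Int lists: take heads while every list is nonempty.
def pvZipStarAux : Nat → List (List (List Int)) → List (List (List Int))
  | 0, _ => []
  | n + 1, ls =>
    if ls.any List.isEmpty then []
    else ls.map (fun x => x.headD []) :: pvZipStarAux n (ls.map List.tail)

def pvZipStar (ls : List (List (List Int))) : List (List (List Int)) :=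
  match ls with
  | [] => []
  | l :: _ => pvZipStarAux l.length ls

def split_context_alt (batch_context : List (List Int)) (split_num : Int) : List (List (List Int)) :=
  let batch_size : Int := ((PySem.List.pyGet? batch_context 0).getD []).length
  let split_size : Int := PySem.Int.floordiv batch_size split_num
  -- assert split_size * split_num == batch_size : raises outside Pre_split_context
  let per_array := batch_context.map (fun arr =>
    (PySem.List.pyRange 0 split_num 1).map (fun i =>
      PySem.List.slice arr (some (split_size * i)) (some (split_size * (i + 1)))))
  pvZipStar per_array

-- ===== PRECONDITION & SPEC =====
-- Pre_ excludes exactly the inputs where A raises: empty batch_context (IndexError at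
-- batch_context[0]), split_num = 0 (ZeroDivisionError), and a batch size not divisible into
-- split_num equal parts (AssertionError).
def Pre_split_context (batch_context : List (List Int)) (split_num : Int) : Prop :=
  batch_context ≠ [] ∧ split_num ≠ 0 ∧
    PySem.Int.floordiv (((batch_context.headD []).length : Int)) split_num * split_num
      = ((batch_context.headD []).length : Int)
instance (batch_context : List (List Int)) (split_num : Int) : Decidable (Pre_split_context batch_context split_num) := by unfold Pre_split_context; infer_instance

def pvWitness_split_context : List (List Int) × Int := ([[1, 2, 3, 4], [5, 6, 7, 8]], 2)

def Spec_split_context (batch_context : List (List Int)) (split_num : Int) (out : List (List (List Int))) : Prop := out = split_context_alt batch_context split_num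
instance (batch_context : List (List Int)) (split_num : Int) (out : List (List (List Int))) : Decidable (Spec_split_context batch_context split_num out) := by unfold Spec_split_context; infer_instance

-- ===== CLAIM (what is proved, stated in full; the proofs are below) =====
def Claim_equal_split_context : Prop := ∀ (batch_context : List (List Int)) (split_num : Int), Dom_split_context batch_context split_num → Pre_split_context batch_context split_num → Spec_split_context batch_context split_num (split_context batch_context split_num)

-- ===== LEMMAS AND PROOFS =====

/-- Transposing a nonempty family of equal-shape chunk lists gives the slice-major gather. -/
lemma pvZipStarAux_transpose (idxs : List Int) (g : List Int → Int → List Int)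
    (bc : List (List Int)) :
    pvZipStarAux idxs.length (bc.map (fun a => idxs.map (g a)))
      = idxs.map (fun i => bc.map (fun a => g a i)) := by
  induction idxs generalizing g with
  | nil => simp [pvZipStarAux]
  | cons i is ih =>
    simp only [List.length_cons, pvZipStarAux, List.any_map, List.map_map]
    simp [Function.comp_def, ih g]

theorem split_context_spec : Claim_equal_split_context := by
  intro bc sn _ hpre
  obtain ⟨hne, _, _⟩ := hpre
  unfold Spec_split_context split_context split_context_alt
  obtain ⟨x, rest, rfl⟩ : ∃ x rest, bc = x :: rest := by
    cases bc with
    | nil => exact absurd rfl hne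
    | cons x rest => exact ⟨x, rest, rfl⟩
  simp only []
  set ss : Int := PySem.Int.floordiv (((PySem.List.pyGet? (x :: rest) 0).getD []).length : Int) sn with hss
  -- A's inner index loop over j is a map over the list itself
  have hA : ∀ i : Int,
      (PySem.List.pyRange 0 ((x :: rest).length : Int) 1).map (fun j =>
        PySem.List.slice (PySem.List.pyGetD (x :: rest) j [])
          (some (ss * i)) (some (ss * (i + 1))))
      = (x :: rest).map (fun a =>
          PySem.List.slice a (some (ss * i)) (some (ss * (i + 1)))) := by
    intro i
    have h := PySem.List.map_pyGetD_pyRange_zero' (xs := (x :: rest)) (d := ([] : List Int))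
    calc (PySem.List.pyRange 0 ((x :: rest).length : Int) 1).map (fun j =>
            PySem.List.slice (PySem.List.pyGetD (x :: rest) j [])
              (some (ss * i)) (some (ss * (i + 1))))
        = ((PySem.List.pyRange 0 ((x :: rest).length : Int) 1).map
            (fun j => PySem.List.pyGetD (x :: rest) j [])).map
            (fun a => PySem.List.slice a (some (ss * i)) (some (ss * (i + 1)))) := by
          rw [List.map_map]; simp [Function.comp]
      _ = _ := by rw [h]
  -- B is A with the loop nesting inverted: transpose lemma
  have hB := pvZipStarAux_transpose (PySem.List.pyRange 0 sn 1)
      (fun a i => PySem.List.slice a (some (ss * i)) (some (ss * (i + 1)))) (x :: rest)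
  simp only [List.map_cons] at hB ⊢
  rw [pvZipStar]
  simp only [List.length_map] at hB ⊢
  rw [hB]
  refine List.map_congr_left (fun i _ => ?_)
  rw [hA i]; simp

-- ===== VERDICT (by name: the statement is the Claim_ definition above) =====
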